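-- pv_equiv track=rewrite | github.com/DWL-May/Algorithm | Topcoder Python/전체탐색/NumberMagic2.py | theNumber
-- ===== SOURCE A (Python) =====
-- def theNumber(answer):
--     c = [
--         "YYYYYYYYNNNNNNNN",
--         "YYYYNNNNYYYYNNNN",
--         "YYNNYYNNYYNNYYNN",
--         "YNYNYNYNYNYNYNYN"
--     ]
--
--     for i in range(16):
--         temp = ""
--         for j in range(len(c)):
--             card = c[j]
--             temp += card[i]
--         if temp == answer:
--             return i + 1
--     return 0
-- ===== SOURCE B (Python) =====
-- def theNumber(answer):
--     # closed-form binary decode: Y=0, N=1, answer[0] most significant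
--     if len(answer) != 4 or any(ch not in "YN" for ch in answer):
--         return 0
--     idx = 0
--     for ch in answer:
--         idx = idx * 2 + (0 if ch == 'Y' else 1)
--     return idx + 1
-- ===== Notes on version B (the rewrite author's own statement) =====
-- stated objective: simpler
-- what changed: Replaces the 16-column table search (building each column string and comparing) with validation plus a closed-form binary decode of the four Y/N answers (Y=0, N=1, MSB first), returning index+1.
import Mathlib
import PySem

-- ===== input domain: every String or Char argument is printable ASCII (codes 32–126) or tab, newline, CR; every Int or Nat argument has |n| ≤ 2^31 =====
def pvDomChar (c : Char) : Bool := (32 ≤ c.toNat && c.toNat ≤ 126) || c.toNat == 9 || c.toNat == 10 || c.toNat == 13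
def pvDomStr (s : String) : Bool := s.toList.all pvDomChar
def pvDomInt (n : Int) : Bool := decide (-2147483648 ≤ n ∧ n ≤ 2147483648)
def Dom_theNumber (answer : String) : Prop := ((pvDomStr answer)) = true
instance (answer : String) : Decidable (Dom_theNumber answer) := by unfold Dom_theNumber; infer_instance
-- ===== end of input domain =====

-- B replaces A's 16-column table search with validation + a closed-form binary decode (simpler).

-- ===== PORT A =====
-- strings are handled on the .toList side (PySem convention); card[i] via PySem.List.pyGet?
-- (for A's literal table the index is always in range, so the none branch is never taken)
def pvColsA : List (List Char) :=
  ["YYYYYYYYNNNNNNNN".toList, "YYYYNNNNYYYYNNNN".toList,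
   "YYNNYYNNYYNNYYNN".toList, "YNYNYNYNYNYNYNYN".toList]

-- the inner loop: temp = ""; for j …: temp += c[j][i]
def pvTemp (i : Int) : List Char :=
  pvColsA.foldl (fun t card => t ++ ((PySem.List.pyGet? card i).elim [] (fun ch => [ch]))) []

def pvLoopA (answer : List Char) : List Int → Int
  | [] => 0
  | i :: rest =>
      let temp := pvTemp i
      if temp = answer then i + 1 else pvLoopA answer rest

def theNumber (answer : String) : Int :=
  pvLoopA answer.toList (PySem.List.pyRange 0 16 1)

-- ===== PORT B =====
def theNumber_alt (answer : String) : Int :=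
  let l := answer.toList
  if l.length == 4 && l.all (fun ch => ch == 'Y' || ch == 'N')
  then (l.foldl (fun idx ch => idx * 2 + (if ch == 'Y' then 0 else 1)) (0 : Int)) + 1
  else 0

-- ===== PRECONDITION & SPEC =====
def Spec_theNumber (answer : String) (out : Int) : Prop := out = theNumber_alt answer
instance (answer : String) (out : Int) : Decidable (Spec_theNumber answer out) := by unfold Spec_theNumber; infer_instance

-- ===== CLAIM (what is proved, stated in full; the proofs are below) =====
def Claim_equal_theNumber : Prop := ∀ (answer : String), Dom_theNumber answer → Spec_theNumber answer (theNumber answer)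

-- ===== LEMMAS AND PROOFS =====

theorem pvMain (l : List Char) :
    pvLoopA l (PySem.List.pyRange 0 16 1) =
      (if l.length == 4 && l.all (fun ch => ch == 'Y' || ch == 'N')
       then (l.foldl (fun idx ch => idx * 2 + (if ch == 'Y' then 0 else 1)) (0 : Int)) + 1
       else 0) := by
  have hr : PySem.List.pyRange 0 16 1 =
      [0,1,2,3,4,5,6,7,8,9,10,11,12,13,14,15] := by decide
  have h0 : pvTemp 0 = ['Y', 'Y', 'Y', 'Y'] := by decide
  have h1 : pvTemp 1 = ['Y', 'Y', 'Y', 'N'] := by decide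
  have h2 : pvTemp 2 = ['Y', 'Y', 'N', 'Y'] := by decide
  have h3 : pvTemp 3 = ['Y', 'Y', 'N', 'N'] := by decide
  have h4 : pvTemp 4 = ['Y', 'N', 'Y', 'Y'] := by decide
  have h5 : pvTemp 5 = ['Y', 'N', 'Y', 'N'] := by decide
  have h6 : pvTemp 6 = ['Y', 'N', 'N', 'Y'] := by decide
  have h7 : pvTemp 7 = ['Y', 'N', 'N', 'N'] := by decide
  have h8 : pvTemp 8 = ['N', 'Y', 'Y', 'Y'] := by decide
  have h9 : pvTemp 9 = ['N', 'Y', 'Y', 'N'] := by decide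
  have h10 : pvTemp 10 = ['N', 'Y', 'N', 'Y'] := by decide
  have h11 : pvTemp 11 = ['N', 'Y', 'N', 'N'] := by decide
  have h12 : pvTemp 12 = ['N', 'N', 'Y', 'Y'] := by decide
  have h13 : pvTemp 13 = ['N', 'N', 'Y', 'N'] := by decide
  have h14 : pvTemp 14 = ['N', 'N', 'N', 'Y'] := by decide
  have h15 : pvTemp 15 = ['N', 'N', 'N', 'N'] := by decide
  rw [hr]
  match l with
  | [] =>
      simp [pvLoopA, h0,h1,h2,h3,h4,h5,h6,h7,h8,h9,h10,h11,h12,h13,h14,h15]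
  | [a] =>
      simp [pvLoopA, h0,h1,h2,h3,h4,h5,h6,h7,h8,h9,h10,h11,h12,h13,h14,h15]
  | [a,b] =>
      simp [pvLoopA, h0,h1,h2,h3,h4,h5,h6,h7,h8,h9,h10,h11,h12,h13,h14,h15]
  | [a,b,c] =>
      simp [pvLoopA, h0,h1,h2,h3,h4,h5,h6,h7,h8,h9,h10,h11,h12,h13,h14,h15]
  | a :: b :: c :: d :: e :: rest =>
      simp [pvLoopA, h0,h1,h2,h3,h4,h5,h6,h7,h8,h9,h10,h11,h12,h13,h14,h15]
  | [a,b,c,d] =>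
      by_cases ha : a = 'Y' ∨ a = 'N'
      · by_cases hb : b = 'Y' ∨ b = 'N'
        · by_cases hc : c = 'Y' ∨ c = 'N'
          · by_cases hd : d = 'Y' ∨ d = 'N'
            · rcases ha with ha | ha <;> rcases hb with hb | hb <;>
                rcases hc with hc | hc <;> rcases hd with hd | hd <;>
                subst ha <;> subst hb <;> subst hc <;> subst hd <;> decide
            · push Not at hd
              simp [pvLoopA, h0,h1,h2,h3,h4,h5,h6,h7,h8,h9,h10,h11,h12,h13,h14,h15,
                hd.1, hd.2, Ne.symm hd.1, Ne.symm hd.2]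
          · push Not at hc
            simp [pvLoopA, h0,h1,h2,h3,h4,h5,h6,h7,h8,h9,h10,h11,h12,h13,h14,h15,
              hc.1, hc.2, Ne.symm hc.1, Ne.symm hc.2]
        · push Not at hb
          simp [pvLoopA, h0,h1,h2,h3,h4,h5,h6,h7,h8,h9,h10,h11,h12,h13,h14,h15,
            hb.1, hb.2, Ne.symm hb.1, Ne.symm hb.2]
      · push Not at ha
        simp [pvLoopA, h0,h1,h2,h3,h4,h5,h6,h7,h8,h9,h10,h11,h12,h13,h14,h15,
          ha.1, ha.2, Ne.symm ha.1, Ne.symm ha.2]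

-- ===== VERDICT (by name: the statement is the Claim_ definition above) =====
theorem theNumber_spec : Claim_equal_theNumber := by
  intro answer _
  unfold Spec_theNumber theNumber theNumber_alt
  exact pvMain answer.toList
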